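-- pv_equiv track=rewrite | github.com/nickovic/rtamt | rtamt/explanation/ltl/discrete_time/explanations.py | explain_unsat_and
-- ===== SOURCE A (Python) =====
-- def explain_unsat_and(op1_signal, op2_signal, intervals):
--     op1_intervals = []
--     op2_intervals = []
--     for begin, end in intervals:
--         op1_state = False
--         op2_state = False
--         for i in range(begin, end+1):
--             if not op1_state and op1_signal[i] < 0:
--                     op1_state = True
--                     op1_start = i
--             elif op1_state and op1_signal[i] >= 0:
--                     op1_state = False
--                     op1_intervals.append([op1_start, i - 1])
--
--             if not op2_state and op2_signal[i] < 0:
--                     op2_state = True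
--                     op2_start = i
--             elif op2_state and op2_signal[i] >= 0:
--                     op2_state = False
--                     op2_intervals.append([op2_start, i - 1])
--         if op1_state:
--             op1_intervals.append([op1_start, i])
--         if op2_state:
--             op2_intervals.append([op2_start, i])
--
--     return op1_intervals, op2_intervals
-- ===== SOURCE B (Python) =====
-- def explain_unsat_and(op1_signal, op2_signal, intervals):
--     # Two-phase per interval: collect negative indices, then group maximal consecutive runs.
--     def runs(sig, begin, end):
--         idxs = [i for i in range(begin, end + 1) if sig[i] < 0]
--         out = []
--         if not idxs:
--             return out
--         run_start = prev = idxs[0]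
--         for i in idxs[1:]:
--             if i != prev + 1:
--                 out.append([run_start, prev])
--                 run_start = i
--             prev = i
--         out.append([run_start, prev])
--         return out
--
--     op1_intervals = []
--     op2_intervals = []
--     for begin, end in intervals:
--         op1_intervals += runs(op1_signal, begin, end)
--         op2_intervals += runs(op2_signal, begin, end)
--     return op1_intervals, op2_intervals
-- ===== Notes on version B (the rewrite author's own statement) =====
-- stated objective: alternative
-- what changed: Replaces A's interleaved per-index transition-flag state machine with a two-phase pass per interval and per signal: first collect the indices with a negative value, then group maximal runs of consecutive indices.
import Mathlib
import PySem

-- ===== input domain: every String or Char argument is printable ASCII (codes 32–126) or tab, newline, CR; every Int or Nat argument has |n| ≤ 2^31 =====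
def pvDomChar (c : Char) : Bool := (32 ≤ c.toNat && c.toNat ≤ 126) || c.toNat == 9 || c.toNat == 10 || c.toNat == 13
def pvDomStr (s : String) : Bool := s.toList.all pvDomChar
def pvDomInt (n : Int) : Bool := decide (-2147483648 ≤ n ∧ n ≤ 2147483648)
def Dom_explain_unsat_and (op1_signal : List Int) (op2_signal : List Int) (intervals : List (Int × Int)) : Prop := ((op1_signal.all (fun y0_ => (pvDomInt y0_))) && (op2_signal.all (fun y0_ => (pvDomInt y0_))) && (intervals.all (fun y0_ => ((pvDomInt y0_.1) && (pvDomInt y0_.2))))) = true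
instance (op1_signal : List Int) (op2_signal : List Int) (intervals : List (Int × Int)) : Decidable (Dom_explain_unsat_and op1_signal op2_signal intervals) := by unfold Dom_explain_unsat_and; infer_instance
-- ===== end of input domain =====

-- B replaces A's per-index transition-flag state machine by a two-phase pass per interval
-- (collect negative indices, then group maximal consecutive runs); alternative decomposition, same cost.

-- ===== PORT A =====
-- sig[i] under Pre_ (index in range); Python's negative-index rule via pyGetD
def pvVal (sig : List Int) (i : Int) : Int := PySem.List.pyGetD sig i 0

-- one iteration of A's inner loop for one signal: state (intervals so far, flag, run start)
def pvStepA (sig : List Int) (t : List (List Int) × Bool × Int) (i : Int) : List (List Int) × Bool × Int :=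
  if t.2.1 = false ∧ pvVal sig i < 0 then (t.1, true, i)
  else if t.2.1 = true ∧ 0 ≤ pvVal sig i then (t.1 ++ [[t.2.2, i - 1]], false, t.2.2)
  else t

def explain_unsat_and (op1_signal : List Int) (op2_signal : List Int) (intervals : List (Int × Int)) : List (List Int) × List (List Int) :=
  intervals.foldl (fun acc p =>
    let r := (PySem.List.pyRange p.1 (p.2 + 1) 1).foldl
      (fun t i => (pvStepA op1_signal t.1 i, pvStepA op2_signal t.2 i))
      ((acc.1, false, 0), (acc.2, false, 0))
    -- the final flush uses the loop variable i, which equals p.2 whenever the flag is set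
    ((if r.1.2.1 then r.1.1 ++ [[r.1.2.2, p.2]] else r.1.1),
     (if r.2.2.1 then r.2.1 ++ [[r.2.2.2, p.2]] else r.2.1)))
  ([], [])

-- ===== PORT B =====
-- phase 1: indices in [b,e] with a negative value
def pvNegIdxs (sig : List Int) (b e : Int) : List Int :=
  (PySem.List.pyRange b (e + 1) 1).filter (fun i => decide (pvVal sig i < 0))

-- phase 2 loop body: state (run_start, prev, out)
def pvStepB (st : Int × Int × List (List Int)) (i : Int) : Int × Int × List (List Int) :=
  if i ≠ st.2.1 + 1 then (i, i, st.2.2 ++ [[st.1, st.2.1]]) else (st.1, i, st.2.2)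

def pvRuns (sig : List Int) (b e : Int) : List (List Int) :=
  match pvNegIdxs sig b e with
  | [] => []
  | h :: t =>
    let r := t.foldl pvStepB (h, h, [])
    r.2.2 ++ [[r.1, r.2.1]]

def explain_unsat_and_alt (op1_signal : List Int) (op2_signal : List Int) (intervals : List (Int × Int)) : List (List Int) × List (List Int) :=
  intervals.foldl (fun acc p => (acc.1 ++ pvRuns op1_signal p.1 p.2, acc.2 ++ pvRuns op2_signal p.1 p.2)) ([], [])

-- ===== PRECONDITION & SPEC =====
-- Pre_: every visited index is a valid Python index of both signals (otherwise A raises IndexError)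
def Pre_explain_unsat_and (op1_signal : List Int) (op2_signal : List Int) (intervals : List (Int × Int)) : Prop :=
  ∀ p ∈ intervals, p.1 ≤ p.2 →
    PySem.Raise.InRange op1_signal.length p.1 ∧ PySem.Raise.InRange op1_signal.length p.2 ∧
    PySem.Raise.InRange op2_signal.length p.1 ∧ PySem.Raise.InRange op2_signal.length p.2
instance (op1_signal : List Int) (op2_signal : List Int) (intervals : List (Int × Int)) : Decidable (Pre_explain_unsat_and op1_signal op2_signal intervals) := by unfold Pre_explain_unsat_and; infer_instance

def pvWitness_explain_unsat_and : List Int × List Int × (List (Int × Int)) := ([-1, 2], [3, -4], [(0, 1)])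

def Spec_explain_unsat_and (op1_signal : List Int) (op2_signal : List Int) (intervals : List (Int × Int)) (out : List (List Int) × List (List Int)) : Prop := out = explain_unsat_and_alt op1_signal op2_signal intervals
instance (op1_signal : List Int) (op2_signal : List Int) (intervals : List (Int × Int)) (out : List (List Int) × List (List Int)) : Decidable (Spec_explain_unsat_and op1_signal op2_signal intervals out) := by unfold Spec_explain_unsat_and; infer_instance

-- ===== CLAIM (what is proved, stated in full; the proofs are below) =====
def Claim_equal_explain_unsat_and : Prop := ∀ (op1_signal : List Int) (op2_signal : List Int) (intervals : List (Int × Int)), Dom_explain_unsat_and op1_signal op2_signal intervals → Pre_explain_unsat_and op1_signal op2_signal intervals → Spec_explain_unsat_and op1_signal op2_signal intervals (explain_unsat_and op1_signal op2_signal intervals)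

-- ===== LEMMAS AND PROOFS =====

-- A's combined loop is the product of two independent one-signal loops
lemma pvFoldPair (s1 s2 : List Int) (L : List Int)
    (t1 t2 : List (List Int) × Bool × Int) :
    L.foldl (fun t i => (pvStepA s1 t.1 i, pvStepA s2 t.2 i)) (t1, t2)
      = (L.foldl (pvStepA s1) t1, L.foldl (pvStepA s2) t2) := by
  induction L generalizing t1 t2 with
  | nil => rfl
  | cons i L ih => simpa [List.foldl_cons] using ih _ _

-- the accumulator of A's one-signal loop factors out
lemma pvFoldA_acc (sig : List Int) (L : List Int) (a : List (List Int)) (st : Bool) (s : Int) :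
    L.foldl (pvStepA sig) (a, st, s)
      = (a ++ (L.foldl (pvStepA sig) ([], st, s)).1, (L.foldl (pvStepA sig) ([], st, s)).2) := by
  induction L generalizing a st s with
  | nil => simp
  | cons i L ih =>
    simp only [List.foldl_cons]
    by_cases h1 : st = false ∧ pvVal sig i < 0
    · rw [show pvStepA sig (a, st, s) i = (a, true, i) from by unfold pvStepA; rw [if_pos h1],
          show pvStepA sig ([], st, s) i = ([], true, i) from by unfold pvStepA; rw [if_pos h1]]
      exact ih a true i
    · by_cases h2 : st = true ∧ 0 ≤ pvVal sig i
      · rw [show pvStepA sig (a, st, s) i = (a ++ [[s, i - 1]], false, s) from by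
              unfold pvStepA; rw [if_neg h1, if_pos h2],
            show pvStepA sig ([], st, s) i = ([[s, i - 1]], false, s) from by
              unfold pvStepA; rw [if_neg h1, if_pos h2]; rfl]
        rw [ih (a ++ [[s, i - 1]]) false s, ih [[s, i - 1]] false s]
        simp
      · rw [show pvStepA sig (a, st, s) i = (a, st, s) from by
              unfold pvStepA; rw [if_neg h1, if_neg h2],
            show pvStepA sig ([], st, s) i = ([], st, s) from by
              unfold pvStepA; rw [if_neg h1, if_neg h2]]
        exact ih a st s

-- the out-list of B's grouping loop factors out
lemma pvFoldB_out (L : List Int) (rs prev : Int) (out : List (List Int)) :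
    L.foldl pvStepB (rs, prev, out)
      = ((L.foldl pvStepB (rs, prev, [])).1, (L.foldl pvStepB (rs, prev, [])).2.1,
         out ++ (L.foldl pvStepB (rs, prev, [])).2.2) := by
  induction L generalizing rs prev out with
  | nil => simp
  | cons i L ih =>
    simp only [List.foldl_cons]
    by_cases h1 : i ≠ prev + 1
    · rw [show pvStepB (rs, prev, out) i = (i, i, out ++ [[rs, prev]]) from by
            unfold pvStepB; rw [if_pos h1],
          show pvStepB (rs, prev, []) i = (i, i, [[rs, prev]]) from by
            unfold pvStepB; rw [if_pos h1]; rfl]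
      rw [ih i i (out ++ [[rs, prev]]), ih i i [[rs, prev]]]
      simp
    · rw [show pvStepB (rs, prev, out) i = (rs, i, out) from by
            unfold pvStepB; rw [if_neg h1],
          show pvStepB (rs, prev, []) i = (rs, i, []) from by
            unfold pvStepB; rw [if_neg h1]]
      exact ih rs i out

-- B's grouping phase, as a function of the pending run (run_start, prev)
def pvG (L : List Int) (rs prev : Int) : List (List Int) :=
  (L.foldl pvStepB (rs, prev, [])).2.2
    ++ [[(L.foldl pvStepB (rs, prev, [])).1, (L.foldl pvStepB (rs, prev, [])).2.1]]

lemma pvG_nil (rs prev : Int) : pvG [] rs prev = [[rs, prev]] := rfl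

lemma pvG_cons (i : Int) (L : List Int) (rs prev : Int) :
    pvG (i :: L) rs prev = if i ≠ prev + 1 then [[rs, prev]] ++ pvG L i i else pvG L rs i := by
  unfold pvG
  simp only [List.foldl_cons]
  by_cases h1 : i ≠ prev + 1
  · rw [show pvStepB (rs, prev, []) i = (i, i, [[rs, prev]]) from by
          unfold pvStepB; rw [if_pos h1]; rfl,
        if_pos h1, pvFoldB_out L i i [[rs, prev]]]
    simp
  · rw [show pvStepB (rs, prev, []) i = (rs, i, []) from by
          unfold pvStepB; rw [if_neg h1],
        if_neg h1]

lemma pvRuns_eq (sig : List Int) (b e : Int) :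
    pvRuns sig b e
      = (match pvNegIdxs sig b e with
         | [] => []
         | h :: t => pvG t h h) := by
  cases h : pvNegIdxs sig b e <;> simp [pvRuns, pvG, h]

-- main invariant: over a contiguous index block, A's state machine computes B's grouped runs,
-- both from a clear state and from a pending run that includes the index just before the block
lemma pvMain (sig : List Int) (n : Nat) : ∀ b : Int,
    (∀ s : Int,
      (let r := (PySem.List.pyRange b (b + (n : Int)) 1).foldl (pvStepA sig) ([], true, s)
       if r.2.1 then r.1 ++ [[r.2.2, b + (n : Int) - 1]] else r.1)
        = pvG ((PySem.List.pyRange b (b + (n : Int)) 1).filter (fun i => decide (pvVal sig i < 0))) s (b - 1))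
    ∧ (∀ s0 : Int,
      (let r := (PySem.List.pyRange b (b + (n : Int)) 1).foldl (pvStepA sig) ([], false, s0)
       if r.2.1 then r.1 ++ [[r.2.2, b + (n : Int) - 1]] else r.1)
        = (match (PySem.List.pyRange b (b + (n : Int)) 1).filter (fun i => decide (pvVal sig i < 0)) with
           | [] => []
           | h :: t => pvG t h h)) := by
  induction n with
  | zero =>
    intro b
    have hnil : PySem.List.pyRange b (b + ((0 : Nat) : Int)) 1 = [] :=
      PySem.List.pyRange_one_eq_nil (by omega)
    constructor
    · intro s; simp [pvG_nil]
    · intro s0; simp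
  | succ n ih =>
    intro b
    have hcons : PySem.List.pyRange b (b + ((n + 1 : Nat) : Int)) 1
        = b :: PySem.List.pyRange (b + 1) ((b + 1) + (n : Int)) 1 := by
      rw [PySem.List.pyRange_one_cons (by push_cast; omega)]
      congr 1
      push_cast
      ring_nf
    have hflush : b + ((n + 1 : Nat) : Int) - 1 = (b + 1) + (n : Int) - 1 := by push_cast; ring
    have hmemL : ∀ x ∈ (PySem.List.pyRange (b + 1) ((b + 1) + (n : Int)) 1).filter
        (fun i => decide (pvVal sig i < 0)), b + 1 ≤ x := by
      intro x hx
      have := (PySem.List.mem_pyRange_one.mp (List.mem_of_mem_filter hx)).1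
      exact this
    constructor
    · intro s
      by_cases hneg : pvVal sig b < 0
      · have hstep : pvStepA sig ([], true, s) b = ([], true, s) := by
          unfold pvStepA; simp; omega
        have hfil : (b :: PySem.List.pyRange (b + 1) ((b + 1) + (n : Int)) 1).filter
            (fun i => decide (pvVal sig i < 0))
            = b :: (PySem.List.pyRange (b + 1) ((b + 1) + (n : Int)) 1).filter
                (fun i => decide (pvVal sig i < 0)) := by
          simp [hneg]
        rw [hcons, hflush]
        simp only [List.foldl_cons, hstep, hfil, pvG_cons]
        have hb : ¬ (b ≠ b - 1 + 1) := by omega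
        rw [if_neg hb]
        have hih := (ih (b + 1)).1 s
        rw [show b + 1 - 1 = b from by ring] at hih
        exact hih
      · have hstep : pvStepA sig ([], true, s) b = ([[s, b - 1]], false, s) := by
          unfold pvStepA; simp; omega
        have hfil : (b :: PySem.List.pyRange (b + 1) ((b + 1) + (n : Int)) 1).filter
            (fun i => decide (pvVal sig i < 0))
            = (PySem.List.pyRange (b + 1) ((b + 1) + (n : Int)) 1).filter
                (fun i => decide (pvVal sig i < 0)) := by
          simp [hneg]
        rw [hcons, hflush]
        simp only [List.foldl_cons, hstep, hfil]
        rw [pvFoldA_acc sig _ [[s, b - 1]] false s]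
        have hih := (ih (b + 1)).2 s
        simp only [] at hih ⊢
        cases hfl : ((PySem.List.pyRange (b + 1) ((b + 1) + (n : Int)) 1).filter
            (fun i => decide (pvVal sig i < 0))) with
        | nil =>
          rw [hfl] at hih
          cases hr : ((PySem.List.pyRange (b + 1) ((b + 1) + (n : Int)) 1).foldl
              (pvStepA sig) ([], false, s)) with
          | mk a1 p =>
            rw [hr] at hih
            cases p with
            | mk fl st =>
              cases fl <;> simp_all [pvG_nil]
        | cons h t =>
          have hhb : h ≠ b - 1 + 1 := by
            have := hmemL h (by rw [hfl]; exact List.mem_cons_self)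
            omega
          rw [hfl] at hih
          rw [pvG_cons, if_pos hhb]
          cases hr : ((PySem.List.pyRange (b + 1) ((b + 1) + (n : Int)) 1).foldl
              (pvStepA sig) ([], false, s)) with
          | mk a1 p =>
            rw [hr] at hih
            cases p with
            | mk fl st =>
              cases fl <;> simp_all
    · intro s0
      by_cases hneg : pvVal sig b < 0
      · have hstep : pvStepA sig ([], false, s0) b = ([], true, b) := by
          unfold pvStepA; simp; omega
        have hfil : (b :: PySem.List.pyRange (b + 1) ((b + 1) + (n : Int)) 1).filter
            (fun i => decide (pvVal sig i < 0))
            = b :: (PySem.List.pyRange (b + 1) ((b + 1) + (n : Int)) 1).filter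
                (fun i => decide (pvVal sig i < 0)) := by
          simp [hneg]
        rw [hcons, hflush]
        simp only [List.foldl_cons, hstep, hfil]
        have hih := (ih (b + 1)).1 b
        simp only [] at hih ⊢
        rw [hih]
        congr 1
        omega
      · have hstep : pvStepA sig ([], false, s0) b = ([], false, s0) := by
          unfold pvStepA; simp; omega
        have hfil : (b :: PySem.List.pyRange (b + 1) ((b + 1) + (n : Int)) 1).filter
            (fun i => decide (pvVal sig i < 0))
            = (PySem.List.pyRange (b + 1) ((b + 1) + (n : Int)) 1).filter
                (fun i => decide (pvVal sig i < 0)) := by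
          simp [hneg]
        rw [hcons, hflush]
        simp only [List.foldl_cons, hstep, hfil]
        exact (ih (b + 1)).2 s0

-- per-interval correspondence: A's state-machine contribution equals B's runs
lemma pvInterval (sig : List Int) (b e : Int) :
    (let r := (PySem.List.pyRange b (e + 1) 1).foldl (pvStepA sig) ([], false, 0)
     if r.2.1 then r.1 ++ [[r.2.2, e]] else r.1) = pvRuns sig b e := by
  rw [pvRuns_eq]
  unfold pvNegIdxs
  by_cases h : b ≤ e
  · have hm := (pvMain sig (e + 1 - b).toNat b).2 0
    rw [show b + (((e + 1 - b).toNat : Nat) : Int) = e + 1 from by omega] at hm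
    rw [show e + 1 - 1 = e from by ring] at hm
    exact hm
  · have hnil : PySem.List.pyRange b (e + 1) 1 = [] :=
      PySem.List.pyRange_one_eq_nil (by omega)
    simp [hnil]

-- ===== VERDICT (by name: the statement is the Claim_ definition above) =====
theorem explain_unsat_and_spec : Claim_equal_explain_unsat_and := by
  intro op1_signal op2_signal intervals _ _
  unfold Spec_explain_unsat_and explain_unsat_and explain_unsat_and_alt
  have hfun : (fun (acc : List (List Int) × List (List Int)) (p : Int × Int) =>
      let r := (PySem.List.pyRange p.1 (p.2 + 1) 1).foldl
        (fun t i => (pvStepA op1_signal t.1 i, pvStepA op2_signal t.2 i))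
        ((acc.1, false, 0), (acc.2, false, 0))
      ((if r.1.2.1 then r.1.1 ++ [[r.1.2.2, p.2]] else r.1.1),
       (if r.2.2.1 then r.2.1 ++ [[r.2.2.2, p.2]] else r.2.1)))
      = (fun acc p => (acc.1 ++ pvRuns op1_signal p.1 p.2, acc.2 ++ pvRuns op2_signal p.1 p.2)) := by
    funext acc p
    simp only [pvFoldPair]
    rw [pvFoldA_acc op1_signal _ acc.1 false 0, pvFoldA_acc op2_signal _ acc.2 false 0]
    have h1 := pvInterval op1_signal p.1 p.2
    have h2 := pvInterval op2_signal p.1 p.2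
    simp only [] at h1 h2 ⊢
    rw [← h1, ← h2]
    cases hr1 : ((PySem.List.pyRange p.1 (p.2 + 1) 1).foldl (pvStepA op1_signal) ([], false, 0)) with
    | mk a1 q1 =>
      cases hr2 : ((PySem.List.pyRange p.1 (p.2 + 1) 1).foldl (pvStepA op2_signal) ([], false, 0)) with
      | mk a2 q2 =>
        cases q1 with
        | mk fl1 st1 =>
          cases q2 with
          | mk fl2 st2 =>
            cases fl1 <;> cases fl2 <;> simp
  rw [hfun]
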